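-- pv_equiv track=rewrite | github.com/kursawe/StA_Advising | prototype_script.py | find_clashing_timeslots_and_modules
-- ===== SOURCE A (Python) =====
-- import collections
--
-- def find_clashing_timeslots_and_modules(module_dictionary, honours_year, semester):
--     """Given timeslot and a dictionary of concurrently running modules return the timeslots that are clashing and the clashing module codes
--
--     Parameters:
--     -----------
--
--     module_dictionary : dictionary
--         keys are module codes, values are lists of strings, which represent timeslots
--
--     honours_year : string
--         the honours year
--
--     semester : string
--         the semester
--
--     Returns:
--     --------
--
--     timetable_clashes_list : list of strings
--         warning messages about clashing modules
--     """
--     timetable_clashes_list = []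
--     all_timeslots = []
--     for module, timeslots in module_dictionary.items():
--         all_timeslots += timeslots
--
--     my_timeslot_counter = collections.Counter(all_timeslots)
--     duplicate_entries = [timeslot for timeslot, count in my_timeslot_counter.items() if count > 1]
--     for timeslot in duplicate_entries:
--         clashing_module_codes = []
--         for module, timeslot_list in module_dictionary.items():
--             if timeslot in timeslot_list:
--                 clashing_module_codes.append(module)
--         warning_string = 'Found timeslot clash for ' + honours_year + ' ' + semester + ' at ' + timeslot + ' between modules '
--         for module_index, module in enumerate(clashing_module_codes):
--             warning_string += module
--             if module_index < len(clashing_module_codes) - 1: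
--                 warning_string += ' and '
--         timetable_clashes_list.append(warning_string)
--
--     return timetable_clashes_list
-- ===== SOURCE B (Python) =====
-- def find_clashing_timeslots_and_modules(module_dictionary, honours_year, semester):
--     slot_modules = {}
--     for module, timeslots in module_dictionary.items():
--         for timeslot in timeslots:
--             slot_modules.setdefault(timeslot, []).append(module)
--     prefix = 'Found timeslot clash for ' + honours_year + ' ' + semester + ' at '
--     return [prefix + timeslot + ' between modules ' + ' and '.join(dict.fromkeys(modules))
--             for timeslot, modules in slot_modules.items() if len(modules) > 1]
-- ===== Notes on version B (the rewrite author's own statement) =====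
-- stated objective: faster
-- what changed: Instead of concatenating all timeslots, counting them, and then rescanning the whole module dictionary once per duplicate timeslot, B makes a single pass that groups the module occurrences per timeslot in one dict and emits each warning with ' and '.join.
import Mathlib
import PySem

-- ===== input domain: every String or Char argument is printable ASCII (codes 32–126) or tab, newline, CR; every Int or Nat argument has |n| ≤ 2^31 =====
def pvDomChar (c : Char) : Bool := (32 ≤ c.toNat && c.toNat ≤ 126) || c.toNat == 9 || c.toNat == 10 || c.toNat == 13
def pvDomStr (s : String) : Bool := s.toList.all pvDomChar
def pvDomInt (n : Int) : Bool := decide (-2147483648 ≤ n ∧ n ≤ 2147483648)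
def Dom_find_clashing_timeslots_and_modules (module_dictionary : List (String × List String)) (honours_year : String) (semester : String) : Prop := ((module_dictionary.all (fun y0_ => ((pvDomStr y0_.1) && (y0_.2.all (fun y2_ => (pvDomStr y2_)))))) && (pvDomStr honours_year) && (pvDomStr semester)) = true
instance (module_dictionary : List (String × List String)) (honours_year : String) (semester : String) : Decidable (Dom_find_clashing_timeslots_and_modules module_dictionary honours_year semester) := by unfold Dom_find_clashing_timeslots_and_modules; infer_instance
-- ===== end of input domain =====

-- B replaces A's per-duplicate rescan of the whole dictionary by ONE pass that groups module
-- occurrences per timeslot in a dict, then emits the warnings with ' and '.join (objective: faster).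

-- ===== PORT A =====
def find_clashing_timeslots_and_modules (module_dictionary : List (String × List String)) (honours_year : String) (semester : String) : List String :=
  let timetable_clashes_list : List String := []
  let all_timeslots : List String := module_dictionary.foldl (fun acc p => acc ++ p.2) []
  let my_timeslot_counter := PySem.Dict.counter all_timeslots
  let duplicate_entries : List String := (my_timeslot_counter.items.filter (fun q => q.2 > 1)).map (fun q => q.1)
  duplicate_entries.foldl (fun acc timeslot =>
    let clashing_module_codes : List String :=
      module_dictionary.foldl (fun cs p => if p.2.contains timeslot then cs ++ [p.1] else cs) []
    let warning_string : String :=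
      "Found timeslot clash for " ++ honours_year ++ " " ++ semester ++ " at " ++ timeslot ++ " between modules "
    let warning_string :=
      (PySem.List.enumerate clashing_module_codes).foldl (fun w q =>
        let w := w ++ q.2
        if q.1 < (clashing_module_codes.length : Int) - 1 then w ++ " and " else w) warning_string
    acc ++ [warning_string]) timetable_clashes_list

-- ===== PORT B =====
def find_clashing_timeslots_and_modules_alt (module_dictionary : List (String × List String)) (honours_year : String) (semester : String) : List String :=
  let slot_modules : PySem.Dict String (List String) :=
    module_dictionary.foldl (fun d p =>
      p.2.foldl (fun d timeslot => d.modify timeslot [] (fun ms => ms ++ [p.1])) d) PySem.Dict.empty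
  let prefix_ : String := "Found timeslot clash for " ++ honours_year ++ " " ++ semester ++ " at "
  (slot_modules.items.filter (fun q => q.2.length > 1)).map (fun q =>
    prefix_ ++ q.1 ++ " between modules " ++ PySem.Str.join " and " (PySem.List.dedup q.2))

-- ===== PRECONDITION & SPEC =====
-- Pre_ excludes association lists with duplicate module codes: they cannot arise from a Python
-- dict (dict construction collapses duplicate keys), so the list form is not a faithful dict there.
def Pre_find_clashing_timeslots_and_modules (module_dictionary : List (String × List String)) (honours_year : String) (semester : String) : Prop :=
  (module_dictionary.map (fun p => p.1)).Nodup
instance (module_dictionary : List (String × List String)) (honours_year : String) (semester : String) : Decidable (Pre_find_clashing_timeslots_and_modules module_dictionary honours_year semester) := by unfold Pre_find_clashing_timeslots_and_modules; infer_instance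

def pvWitness_find_clashing_timeslots_and_modules : (List (String × List String)) × String × String :=
  ([("MT1001", ["Mon 9"]), ("MT2002", ["Mon 9", "Tue 10"])], "year one", "semester one")

def Spec_find_clashing_timeslots_and_modules (module_dictionary : List (String × List String)) (honours_year : String) (semester : String) (out : List String) : Prop := out = find_clashing_timeslots_and_modules_alt module_dictionary honours_year semester
instance (module_dictionary : List (String × List String)) (honours_year : String) (semester : String) (out : List String) : Decidable (Spec_find_clashing_timeslots_and_modules module_dictionary honours_year semester out) := by unfold Spec_find_clashing_timeslots_and_modules; infer_instance

-- ===== CLAIM (what is proved, stated in full; the proofs are below) =====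
def Claim_equal_find_clashing_timeslots_and_modules : Prop := ∀ (module_dictionary : List (String × List String)) (honours_year : String) (semester : String), Dom_find_clashing_timeslots_and_modules module_dictionary honours_year semester → Pre_find_clashing_timeslots_and_modules module_dictionary honours_year semester → Spec_find_clashing_timeslots_and_modules module_dictionary honours_year semester (find_clashing_timeslots_and_modules module_dictionary honours_year semester)

-- ===== LEMMAS AND PROOFS =====

-- all timeslot occurrences, in order
def pvALL (md : List (String × List String)) : List String := md.flatMap (fun p => p.2)
-- all (timeslot, module) occurrence pairs, in order
def pvL (md : List (String × List String)) : List (String × String) :=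
  md.flatMap (fun p => p.2.map (fun t => (t, p.1)))
-- the module occurrences of timeslot t, in order
def pvMods (md : List (String × List String)) (t : String) : List String :=
  ((pvL md).filter (fun q => q.1 == t)).map (fun q => q.2)
-- the distinct modules containing t, in order
def pvClash (md : List (String × List String)) (t : String) : List String :=
  (md.filter (fun p => p.2.contains t)).map (fun p => p.1)
def pvMsg (honours_year semester t : String) (cs : List String) : String :=
  "Found timeslot clash for " ++ honours_year ++ " " ++ semester ++ " at " ++ t ++ " between modules "
    ++ PySem.Str.join " and " cs

-- A's warning-string loop is ' and '.join
lemma pv_joinA (n : Int) (cs : List String) : ∀ (k : Int) (w : String), k + cs.length = n → cs ≠ [] →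
    (PySem.List.enumerate cs k).foldl (fun w q =>
        if q.1 < n - 1 then w ++ q.2 ++ " and " else w ++ q.2) w
      = w ++ PySem.Str.join " and " cs := by
  induction cs with
  | nil => intro k w _ hne; exact absurd rfl hne
  | cons c cs ih =>
    intro k w hk _
    rw [PySem.List.enumerate_cons, List.foldl_cons]
    cases cs with
    | nil =>
      simp only [List.length_cons, List.length_nil] at hk
      have hc : ¬ (k < n - 1) := by omega
      simp only [hc, if_false, PySem.List.enumerate, List.foldl_nil]
      apply String.toList_inj.mp
      simp [PySem.Str.toList_join, PySem.Chars.join_singleton]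
    | cons b l =>
      simp only [List.length_cons] at hk
      have hc : k < n - 1 := by push_cast at hk ⊢; omega
      simp only [hc, if_true]
      rw [ih (k + 1) ((w ++ c) ++ " and ") (by simp only [List.length_cons] at hk ⊢; push_cast at hk ⊢; omega) (by simp)]
      apply String.toList_inj.mp
      simp [PySem.Str.toList_join, PySem.Chars.join_cons_cons, String.toList_append]

-- A in closed form
lemma pv_A_eq (md : List (String × List String)) (hy sem : String) :
    find_clashing_timeslots_and_modules md hy sem
      = ((PySem.Set.ofList (pvALL md)).filter (fun t => decide ((((pvALL md).count t : Int)) > 1))).map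
          (fun t => pvMsg hy sem t (pvClash md t)) := by
  simp only [find_clashing_timeslots_and_modules]
  rw [show (List.foldl (fun acc p => acc ++ p.2) ([] : List String) md) = pvALL md from by
        rw [PySem.List.foldl_append_eq_flatMap]; simp [pvALL]]
  rw [PySem.List.foldl_append_singleton_eq_map]
  simp only [List.nil_append, PySem.Dict.items_counter, List.filter_map, List.map_map,
    Function.comp_def, List.map_id, List.map_id']
  apply List.map_congr_left
  intro t ht
  rw [PySem.List.foldl_append_if]
  simp only [List.nil_append]
  have hne : pvClash md t ≠ [] := by
    have htmem : t ∈ PySem.Set.ofList (pvALL md) := List.mem_of_mem_filter ht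
    have htmem2 : t ∈ pvALL md := (PySem.Set.mem_ofList _ t).mp htmem
    obtain ⟨p, hp, hptin⟩ := List.mem_flatMap.mp htmem2
    have hmem : p.1 ∈ pvClash md t := by
      simp only [pvClash, List.mem_map]
      exact ⟨p, List.mem_filter.mpr ⟨hp, List.contains_iff_mem.mpr hptin⟩, rfl⟩
    intro h; rw [h] at hmem; exact absurd hmem (List.not_mem_nil)
  exact pv_joinA _ _ 0 _ (by simp) (by simpa [pvClash] using hne)

-- B's nested loop is one fold over the occurrence pairs
lemma pv_B_fold (md : List (String × List String)) :
    ∀ (d : PySem.Dict String (List String)),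
    md.foldl (fun d p => p.2.foldl (fun d timeslot => d.modify timeslot [] (fun ms => ms ++ [p.1])) d) d
      = (pvL md).foldl (fun d q => d.modify q.1 [] (fun ms => ms ++ [q.2])) d := by
  induction md with
  | nil => intro d; rfl
  | cons p md ih =>
    intro d
    simp only [pvL] at ih ⊢
    rw [List.foldl_cons, ih, List.flatMap_cons, List.foldl_append, List.foldl_map]

-- a Nodup-keyed dict is its keys paired with their values
lemma pv_items_eq {κ ν : Type} [BEq κ] [LawfulBEq κ] (d : PySem.Dict κ ν) (d0 : ν) (h : d.keys.Nodup) :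
    d.items = d.keys.map (fun k => (k, d.getD k d0)) := by
  have h2 : d.keys.map (fun k => (k, d.getD k d0)) = d.items.map (fun p => (p.1, d.getD p.1 d0)) := by
    simp only [PySem.Dict.keys, List.map_map]
    rfl
  rw [h2]
  symm
  rw [List.map_congr_left (l := d.items) (f := fun p => (p.1, d.getD p.1 d0)) (g := id)
      (fun p hp => ?_), List.map_id]
  have hget := PySem.Dict.getD_of_mem_items d (k := p.1) (v := p.2) (by simpa using hp) h d0
  show (p.1, d.getD p.1 d0) = p
  rw [hget]

lemma pv_L_map_fst (md : List (String × List String)) : (pvL md).map (fun q => q.1) = pvALL md := by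
  simp [pvL, pvALL, List.map_flatMap, List.map_map, Function.comp_def]

-- B in closed form
lemma pv_B_eq (md : List (String × List String)) (hy sem : String) :
    find_clashing_timeslots_and_modules_alt md hy sem
      = ((PySem.Set.ofList (pvALL md)).filter (fun t => decide ((pvMods md t).length > 1))).map
          (fun t => pvMsg hy sem t (PySem.List.dedup (pvMods md t))) := by
  simp only [find_clashing_timeslots_and_modules_alt]
  rw [pv_B_fold]
  have hnd : (((pvL md).foldl (fun d q => d.modify q.1 [] (fun ms => ms ++ [q.2])) PySem.Dict.empty)).keys.Nodup :=
    PySem.Dict.nodup_keys_foldl_modify_key (pvL md) (fun q => q.1) [] (fun _ q ms => ms ++ [q.2])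
      PySem.Dict.empty (by simp [PySem.Dict.keys_empty])
  rw [pv_items_eq _ [] hnd]
  have hkeys : (((pvL md).foldl (fun d q => d.modify q.1 [] (fun ms => ms ++ [q.2])) PySem.Dict.empty)).keys
      = PySem.Set.ofList (pvALL md) := by
    have h1 := PySem.Dict.keys_foldl_modify_key (pvL md) (fun q => q.1) [] (fun _ q ms => ms ++ [q.2])
      PySem.Dict.empty
    rw [h1, PySem.Dict.keys_empty, pv_L_map_fst]
    rfl
  have hget : ∀ t, ((pvL md).foldl (fun d q => d.modify q.1 [] (fun ms => ms ++ [q.2])) PySem.Dict.empty).getD t []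
      = pvMods md t := by
    intro t
    have h1 := PySem.Dict.getD_foldl_modify_append (pvL md) PySem.Dict.empty t
    simpa [pvMods, PySem.Dict.getD_empty] using h1
  rw [hkeys]
  rw [show (fun k => (k, ((pvL md).foldl (fun d q => d.modify q.1 [] (fun ms => ms ++ [q.2])) PySem.Dict.empty).getD k []))
      = (fun k => (k, pvMods md k)) from funext fun k => by rw [hget]]
  rw [List.filter_map, List.map_map]
  simp only [Function.comp_def]
  rfl

lemma pv_mods_len (md : List (String × List String)) (t : String) :
    (pvMods md t).length = (pvALL md).count t := by
  rw [pvMods, List.length_map, ← List.countP_eq_length_filter, ← pv_L_map_fst md,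
    List.count_eq_countP, List.countP_map]
  rfl

lemma pv_foldl_add_replicate {α : Type} [BEq α] [LawfulBEq α] (x : α) :
    ∀ (n : Nat) (s : PySem.Set α),
    List.foldl PySem.Set.add s (List.replicate n x) = if n = 0 then s else PySem.Set.add s x := by
  intro n
  induction n with
  | zero => intro s; simp
  | succ m ih =>
    intro s
    rw [List.replicate_succ, List.foldl_cons, ih]
    by_cases hm : m = 0
    · simp [hm]
    · simp only [hm, if_false, Nat.succ_ne_zero, Nat.add_eq_zero, and_false]
      have hx : x ∈ PySem.Set.add s x := (PySem.Set.mem_add s x x).mpr (Or.inr rfl)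
      have hc : (PySem.Set.add s x).contains x = true := List.contains_iff_mem.mpr hx
      unfold PySem.Set.add
      unfold PySem.Set.add at hc
      rw [hc]
      simp

lemma pv_mods_eq_flat (md : List (String × List String)) (t : String) :
    pvMods md t = md.flatMap (fun p => List.replicate (p.2.count t) p.1) := by
  induction md with
  | nil => rfl
  | cons p md ih =>
    simp only [pvMods, pvL, List.flatMap_cons, List.filter_append, List.map_append] at ih ⊢
    rw [ih]
    congr 1
    rw [List.filter_map, List.map_map]
    rw [show ((fun q => q.2) ∘ (fun t' => (t', p.1)) : String → String) = fun _ => p.1 from rfl]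
    rw [List.map_const', List.count_eq_countP, List.countP_eq_length_filter]
    rfl

lemma pv_dedup_flat (t : String) : ∀ (md : List (String × List String)) (s : List String),
    (∀ p ∈ md, p.1 ∉ s) → (md.map (fun p => p.1)).Nodup →
    List.foldl PySem.Set.add s (md.flatMap (fun p => List.replicate (p.2.count t) p.1))
      = s ++ pvClash md t := by
  intro md
  induction md with
  | nil => intro s _ _; simp [pvClash]
  | cons p md ih =>
    intro s hs hnd
    simp only [List.map_cons, List.nodup_cons, List.mem_map] at hnd
    simp only [List.flatMap_cons, List.foldl_append]
    rw [pv_foldl_add_replicate]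
    by_cases ht : p.2.contains t
    · have htm : t ∈ p.2 := List.contains_iff_mem.mp ht
      have hcnt : p.2.count t ≠ 0 := by
        have := List.count_pos_iff.mpr htm
        omega
      rw [if_neg hcnt]
      have hps : p.1 ∉ s := hs p (List.mem_cons_self)
      have hadd : PySem.Set.add s p.1 = s ++ [p.1] := by
        have hcf : s.contains p.1 = false := by
          rw [← Bool.not_eq_true, List.contains_iff_mem]
          exact hps
        unfold PySem.Set.add
        rw [show PySem.Set.contains s p.1 = false from hcf]
        simp
      rw [hadd, ih (s ++ [p.1]) ?_ hnd.2]
      · simp [pvClash, List.filter_cons, htm, List.append_assoc]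
      · intro q hq
        simp only [List.mem_append, List.mem_singleton]
        push_neg
        refine ⟨hs q (List.mem_cons_of_mem _ hq), fun h => hnd.1 ⟨q, hq, h⟩⟩
    · have hcnt : p.2.count t = 0 := by
        rw [List.count_eq_zero]
        intro h
        exact absurd (List.contains_iff_mem.mpr h) (by simpa using ht)
      rw [if_pos hcnt, ih s (fun q hq => hs q (List.mem_cons_of_mem _ hq)) hnd.2]
      have htm' : t ∉ p.2 := fun hmem => ht (List.contains_iff_mem.mpr hmem)
      simp [pvClash, List.filter_cons, htm']

lemma pv_dedup_mods (md : List (String × List String)) (t : String)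
    (h : (md.map (fun p => p.1)).Nodup) :
    PySem.List.dedup (pvMods md t) = pvClash md t := by
  rw [PySem.List.dedup_eq_ofList, pv_mods_eq_flat]
  have := pv_dedup_flat t md [] (by simp) h
  simpa [PySem.Set.ofList, PySem.Set.empty] using this

-- ===== VERDICT (by name: the statement is the Claim_ definition above) =====
theorem find_clashing_timeslots_and_modules_spec : Claim_equal_find_clashing_timeslots_and_modules := by
  intro md hy sem _hdom hpre
  unfold Spec_find_clashing_timeslots_and_modules
  rw [pv_A_eq, pv_B_eq]
  rw [List.filter_congr (fun t _ => ?_)]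
  · exact List.map_congr_left (fun t _ => by rw [pv_dedup_mods md t hpre])
  · rw [pv_mods_len]
    simp only [decide_eq_decide]
    omega
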